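-- pv_equiv track=rewrite | github.com/anassohail99/Compiler-Construction | lexer.py | split_punctuators
-- ===== SOURCE A (Python) =====
-- def split_punctuators(word_list):
--     punctuators = ';,:.(){}[]'
--     for index,word in enumerate(word_list):
--         if word in punctuators and len(word)<2:
--             continue
--         else:
--             new_word = ''
--             new_index = index
--             i=0
--             for char in word:
--                 if char in punctuators:
--                     #insert the punctuators in list
--                     word_list.insert(new_index+1,char)
--                     if word[i+1:]!='':
--                         #insert the secod half of word after punc
--                         word_list.insert(new_index+2,word[i+1:])
--                     if new_word!='':
--                         word_list[new_index] = new_word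
--                     else:
--                         del word_list[new_index]
--                     new_word = ''
--                     break
--                 else:
--                     new_word += char
--                     i +=1
--     return word_list
-- ===== SOURCE B (Python) =====
-- def split_punctuators(word_list):
--     # One linear pass building a fresh output list; the input list is NOT
--     # mutated (the original mutates its argument in place) -- return value only.
--     punctuators = ';,:.(){}[]'
--     out = []
--     for word in word_list:
--         if not word:
--             out.append(word)  # keep empty words as-is
--             continue
--         cur = ''
--         for ch in word:
--             if ch in punctuators:
--                 if cur:
--                     out.append(cur)
--                     cur = ''
--                 out.append(ch)
--             else:
--                 cur += ch
--         if cur: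
--             out.append(cur)
--     return out
-- ===== Notes on version B (the rewrite author's own statement) =====
-- stated objective: alternative
-- what changed: Instead of repeatedly mutating the input list in place (insert/delete while enumerate re-scans the freshly inserted pieces), B makes one linear pass over the words, splitting each word once with a running buffer and appending the tokens to a fresh output list; B does not mutate its argument.
import Mathlib
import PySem

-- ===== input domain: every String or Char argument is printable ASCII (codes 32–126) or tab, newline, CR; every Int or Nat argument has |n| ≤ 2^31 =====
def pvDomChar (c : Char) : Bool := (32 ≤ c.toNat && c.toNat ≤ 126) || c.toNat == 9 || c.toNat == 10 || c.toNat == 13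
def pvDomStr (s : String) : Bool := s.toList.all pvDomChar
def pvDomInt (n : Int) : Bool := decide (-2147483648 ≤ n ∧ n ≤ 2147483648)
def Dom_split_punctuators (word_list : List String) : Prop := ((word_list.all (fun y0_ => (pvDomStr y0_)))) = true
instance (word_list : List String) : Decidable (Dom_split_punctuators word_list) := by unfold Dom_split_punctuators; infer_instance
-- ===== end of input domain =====

-- B replaces A's in-place insert/delete rewriting (re-scanned by enumerate) with one linear
-- pass that splits each word once into a fresh output list; equivalence is about the RETURN
-- value only (A mutates its argument in place, B does not).

-- ===== PORT A =====
-- the punctuator characters of the string ';,:.(){}[]'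
def pvPunct : List Char := [';', ',', ':', '.', '(', ')', '{', '}', '[', ']']

-- A's inner 'for char in word' loop: builds new_word and i until the first punctuator char,
-- where A breaks; returns none when the loop finishes without break (nothing is mutated then).
def innerA : List Char → List Char → Nat → Option (List Char × Char × Nat)
  | [], _, _ => none
  | c :: rest, new_word, i =>
    if pvPunct.contains c then some (new_word, c, i)
    else innerA rest (new_word ++ [c]) (i + 1)

-- fuel bound for A's enumerate-over-a-mutating-list loop (each iteration strictly decreases
-- this measure of the unprocessed tail; proved in loopA_eq below), so the fuel never runs out
-- and the port computes exactly what the Python loop computes.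
def costW (w : List Char) : Nat := 2 * w.length + w.countP (fun c => pvPunct.contains c) + 1
def measureA (ws : List (List Char)) : Nat := (ws.map costW).sum

-- A's outer loop: 'for index, word in enumerate(word_list)' over the list it mutates;
-- the iterator reads word_list[index] from the current list until index runs off the end.
-- All insert/set/delete indices are in range, so insertIdx/set/eraseIdx are Python-exact here.
def loopA : Nat → List (List Char) → Nat → List (List Char)
  | 0, ws, _ => ws
  | fuel + 1, ws, index =>
    match ws[index]? with
    | none => ws
    | some word =>
      if PySem.Chars.isIn word pvPunct ∧ word.length < 2 then
        loopA fuel ws (index + 1)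
      else
        match innerA word [] 0 with
        | none => loopA fuel ws (index + 1)
        | some (new_word, c, i) =>
          let suffix := word.drop (i + 1)              -- word[i+1:]
          let ws1 := ws.insertIdx (index + 1) [c]      -- word_list.insert(new_index+1, char)
          let ws2 := if suffix ≠ [] then ws1.insertIdx (index + 2) suffix else ws1
          let ws3 := if new_word ≠ [] then ws2.set index new_word else ws2.eraseIdx index
          loopA fuel ws3 (index + 1)

def split_punctuators (word_list : List String) : List String :=
  (loopA (measureA (word_list.map String.toList) + 1) (word_list.map String.toList) 0).map
    (fun cs => String.ofList cs)

-- ===== PORT B =====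
-- B's inner 'for ch in word' loop: out is the shared output list, cur the running buffer.
def innerB (out : List (List Char)) (cur : List Char) : List Char → List (List Char)
  | [] => if cur ≠ [] then out ++ [cur] else out
  | c :: rest =>
    if pvPunct.contains c then
      innerB ((if cur ≠ [] then out ++ [cur] else out) ++ [[c]]) [] rest
    else innerB out (cur ++ [c]) rest

def split_punctuators_alt (word_list : List String) : List String :=
  (word_list.foldl (fun out word =>
      if word.toList = [] then out ++ [word.toList]       -- keep empty words as-is
      else innerB out [] word.toList) []).map (fun cs => String.ofList cs)

-- ===== PRECONDITION & SPEC =====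
def Spec_split_punctuators (word_list : List String) (out : List String) : Prop := out = split_punctuators_alt word_list
instance (word_list : List String) (out : List String) : Decidable (Spec_split_punctuators word_list out) := by unfold Spec_split_punctuators; infer_instance

-- ===== CLAIM (what is proved, stated in full; the proofs are below) =====
def Claim_equal_split_punctuators : Prop := ∀ (word_list : List String), Dom_split_punctuators word_list → Spec_split_punctuators word_list (split_punctuators word_list)

-- ===== LEMMAS AND PROOFS =====

-- the tokens both programs produce for one word
def splitF (w : List Char) : List (List Char) := if w = [] then [w] else innerB [] [] w

lemma innerA_none (w : List Char) (h : w.dropWhile (fun a => !pvPunct.contains a) = []) :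
    ∀ nw i, innerA w nw i = none := by
  induction w with
  | nil => intro nw i; rfl
  | cons a r ih =>
    intro nw i
    by_cases hpa : a ∈ pvPunct
    · simp [List.dropWhile_cons, hpa] at h
    · simp [List.dropWhile_cons, hpa] at h
      have hc : pvPunct.contains a = false := by simp [hpa]
      simp only [innerA, hc, Bool.false_eq_true, if_false]
      exact ih (by simpa using h) _ _

lemma innerA_some (w : List Char) (c : Char) (s : List Char)
    (h : w.dropWhile (fun a => !pvPunct.contains a) = c :: s) :
    ∀ nw i, innerA w nw i =
      some (nw ++ w.takeWhile (fun a => !pvPunct.contains a), c,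
            i + (w.takeWhile (fun a => !pvPunct.contains a)).length) := by
  induction w with
  | nil => simp at h
  | cons a r ih =>
    intro nw i
    by_cases hpa : a ∈ pvPunct
    · have hc : pvPunct.contains a = true := by simp [hpa]
      simp [List.dropWhile_cons, hpa] at h
      obtain ⟨rfl, rfl⟩ := h
      simp [innerA, List.takeWhile_cons, hc, hpa]
    · have hc : pvPunct.contains a = false := by simp [hpa]
      simp [List.dropWhile_cons, hpa] at h
      simp only [innerA, hc, Bool.false_eq_true, if_false]
      rw [ih (by simpa using h) (nw ++ [a]) (i + 1)]
      simp [List.takeWhile_cons, hpa, List.append_assoc] <;> omega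

lemma dropWhile_head_contains (w : List Char) (c : Char) (s : List Char)
    (h : w.dropWhile (fun a => !pvPunct.contains a) = c :: s) : pvPunct.contains c = true := by
  induction w with
  | nil => simp at h
  | cons a r ih =>
    by_cases hpa : a ∈ pvPunct
    · simp [List.dropWhile_cons, hpa] at h
      obtain ⟨rfl, -⟩ := h
      simp [hpa]
    · simp [List.dropWhile_cons, hpa] at h
      exact ih (by simpa using h)

lemma innerB_out (w : List Char) : ∀ out cur, innerB out cur w = out ++ innerB [] cur w := by
  induction w with
  | nil => intro out cur; by_cases hc : cur = [] <;> simp [innerB, hc]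
  | cons a r ih =>
    intro out cur
    by_cases hpa : a ∈ pvPunct
    · have hc : pvPunct.contains a = true := by simp [hpa]
      by_cases hcur : cur = []
      · subst hcur
        rw [show innerB out [] (a :: r) = innerB (out ++ [[a]]) [] r from by simp [innerB, hpa],
            show innerB ([] : List (List Char)) [] (a :: r) = innerB [[a]] [] r from by
              simp [innerB, hpa]]
        rw [ih (out ++ [[a]]) [], ih [[a]] []]
        simp
      · rw [show innerB out cur (a :: r) = innerB (out ++ [cur] ++ [[a]]) [] r from by
              simp [innerB, hpa, hcur],
            show innerB [] cur (a :: r) = innerB ([cur] ++ [[a]]) [] r from by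
              simp [innerB, hpa, hcur]]
        rw [ih (out ++ [cur] ++ [[a]]) [], ih ([cur] ++ [[a]]) []]
        simp
    · have hc : pvPunct.contains a = false := by simp [hpa]
      simp only [innerB, hc, Bool.false_eq_true, if_false]
      exact ih _ _

lemma innerB_nopunct (w : List Char) : ∀ cur, (∀ a ∈ w, pvPunct.contains a = false) →
    innerB [] cur w = if cur ++ w ≠ [] then [cur ++ w] else [] := by
  induction w with
  | nil => intro cur _; by_cases hc : cur = [] <;> simp [innerB, hc]
  | cons a r ih =>
    intro cur h
    have hpa : pvPunct.contains a = false := h a (by simp)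
    simp only [innerB, hpa, Bool.false_eq_true, if_false]
    rw [ih (cur ++ [a]) (fun b hb => h b (by simp [hb]))]
    simp

lemma innerB_punct (w : List Char) : ∀ cur c s,
    w.dropWhile (fun a => !pvPunct.contains a) = c :: s →
    innerB [] cur w =
      (if cur ++ w.takeWhile (fun a => !pvPunct.contains a) ≠ []
       then [cur ++ w.takeWhile (fun a => !pvPunct.contains a)] else [])
      ++ [c] :: innerB [] [] s := by
  induction w with
  | nil => intro cur c s h; simp at h
  | cons a r ih =>
    intro cur c s h
    by_cases hpa : a ∈ pvPunct
    · have hc : pvPunct.contains a = true := by simp [hpa]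
      simp [List.dropWhile_cons, hpa] at h
      obtain ⟨rfl, rfl⟩ := h
      simp only [innerB, hc, if_true]
      rw [innerB_out]
      by_cases hcur : cur = [] <;> simp [List.takeWhile_cons, hc, hcur, hpa]
    · have hc : pvPunct.contains a = false := by simp [hpa]
      simp [List.dropWhile_cons, hpa] at h
      simp only [innerB, hc, Bool.false_eq_true, if_false]
      rw [ih (cur ++ [a]) c s (by simpa using h)]
      simp [List.takeWhile_cons, hc, hpa]

lemma insertIdx_append₂ {α : Type} : ∀ (pre : List α) (k : Nat) (rest : List α) (x : α),
    (pre ++ rest).insertIdx (pre.length + k) x = pre ++ rest.insertIdx k x := by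
  intro pre
  induction pre with
  | nil => intro k rest x; simp
  | cons p pre ih =>
    intro k rest x
    have hlen : (p :: pre).length + k = (pre.length + k) + 1 := by simp; omega
    rw [hlen]
    simp only [List.cons_append, List.insertIdx_succ_cons]
    rw [ih]

lemma splitF_single_punct (c : Char) (hc : pvPunct.contains c = true) : splitF [c] = [[c]] := by
  simp [splitF, innerB, hc]

lemma costW_pos (w : List Char) : 1 ≤ costW w := by unfold costW; omega

lemma measureA_cons (x : List Char) (xs : List (List Char)) :
    measureA (x :: xs) = costW x + measureA xs := by simp [measureA]

-- main invariant of A's loop: processed prefix stays, the unprocessed tail ends up fully split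
lemma loopA_eq : ∀ (fuel : Nat) (pre rest : List (List Char)), measureA rest < fuel →
    loopA fuel (pre ++ rest) pre.length = pre ++ rest.flatMap splitF := by
  intro fuel
  induction fuel with
  | zero => intro pre rest h; exact absurd h (Nat.not_lt_zero _)
  | succ f ih =>
    intro pre rest h
    match rest with
    | [] =>
      have hget : (pre ++ ([] : List (List Char)))[pre.length]? = none := by simp
      simp [loopA, hget]
    | w :: rs =>
      have hget : (pre ++ w :: rs)[pre.length]? = some w := by
        rw [List.getElem?_append_right (le_refl _)]
        simp
      have hm : measureA (w :: rs) = costW w + measureA rs := by simp [measureA]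
      by_cases hskip : PySem.Chars.isIn w pvPunct ∧ w.length < 2
      · -- skip branch: w is '' or a single punctuator, kept as-is
        have hmr : measureA rs < f := by have := costW_pos w; omega
        have hstep : loopA (f + 1) (pre ++ w :: rs) pre.length
            = loopA f (pre ++ w :: rs) (pre.length + 1) := by
          simp only [loopA, hget, if_pos hskip]
        rw [hstep, show pre ++ w :: rs = (pre ++ [w]) ++ rs by simp,
            show pre.length + 1 = (pre ++ [w]).length by simp, ih _ rs hmr]
        have hw : splitF w = [w] := by
          match w, hskip with
          | [], _ => rfl
          | [c], ⟨h1, _⟩ =>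
            have : [c] <:+: pvPunct := (PySem.Chars.isIn_iff_infix _ _).1 h1
            obtain ⟨s1, t1, hst⟩ := this
            have hc : pvPunct.contains c = true := by
              have : c ∈ pvPunct := by rw [← hst]; simp
              simpa using this
            exact splitF_single_punct c hc
          | c1 :: c2 :: t, ⟨_, h2⟩ => simp at h2
        simp [hw]
      · cases hdw : w.dropWhile (fun a => !pvPunct.contains a) with
        | nil =>
          -- no punctuator in w: the inner loop finishes without break, nothing is mutated
          have hnone : innerA w [] 0 = none := innerA_none w hdw [] 0
          have hwne : w ≠ [] := by
            intro hw0
            exact hskip ⟨by simp [hw0, PySem.Chars.isIn_nil], by simp [hw0]⟩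
          have hall : ∀ a ∈ w, pvPunct.contains a = false := by
            intro a ha
            have h2 := List.dropWhile_eq_nil_iff.1 hdw a ha
            simpa using h2
          have hmr : measureA rs < f := by have := costW_pos w; omega
          have hstep : loopA (f + 1) (pre ++ w :: rs) pre.length
              = loopA f (pre ++ w :: rs) (pre.length + 1) := by
            simp only [loopA, hget, if_neg hskip, hnone]
          rw [hstep, show pre ++ w :: rs = (pre ++ [w]) ++ rs by simp,
              show pre.length + 1 = (pre ++ [w]).length by simp, ih _ rs hmr]
          have hw : splitF w = [w] := by
            unfold splitF
            rw [if_neg hwne, innerB_nopunct w [] hall]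
            simp [hwne]
          simp [hw]
        | cons c s =>
          -- first punctuator at position nw.length: w = nw ++ c :: s
          set nw := w.takeWhile (fun a => !pvPunct.contains a) with hnw
          have hsome : innerA w [] 0 = some (nw, c, nw.length) := by
            rw [innerA_some w c s hdw [] 0, ← hnw]
            simp
          have hc : pvPunct.contains c = true := dropWhile_head_contains w c s hdw
          have hcmem : c ∈ pvPunct := by simpa using hc
          have hweq : w = nw ++ c :: s := by
            conv_lhs => rw [← List.takeWhile_append_dropWhile (p := fun a => !pvPunct.contains a) (l := w)]
            rw [hdw, ← hnw]
          have hsuffix : w.drop (nw.length + 1) = s := by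
            rw [hweq, show nw ++ c :: s = (nw ++ [c]) ++ s by simp,
                show nw.length + 1 = (nw ++ [c]).length by simp, List.drop_left]
          have hnwall : ∀ a ∈ nw, a ∉ pvPunct := by
            intro a ha
            rw [hnw] at ha
            simpa using List.mem_takeWhile_imp ha
          have hnwcount : nw.countP (fun a => decide (a ∈ pvPunct)) = 0 := by
            rw [List.countP_eq_zero]
            intro a ha
            simpa using hnwall a ha
          have hc4 : costW [c] = 4 := by simp [costW, hcmem]
          have hkey : costW w + 2 = 2 * nw.length + costW [c] + costW s + 1 := by
            rw [hweq]
            simp [costW, List.countP_append, List.countP_cons, hnwcount, hcmem]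
            omega
          have hsplitw : splitF w = (if nw = [] then [] else [nw]) ++ [c] :: innerB [] [] s := by
            have hwne : w ≠ [] := by rw [hweq]; simp
            unfold splitF
            rw [if_neg hwne, innerB_punct w [] c s hdw, ← hnw]
            by_cases hnwe : nw = [] <;> simp [hnwe]
          have hssplit : s ≠ [] → splitF s = innerB [] [] s := by
            intro hs
            unfold splitF
            rw [if_neg hs]
          have hstep : loopA (f + 1) (pre ++ w :: rs) pre.length
              = loopA f (if nw ≠ []
                  then (if w.drop (nw.length + 1) ≠ []
                        then ((pre ++ w :: rs).insertIdx (pre.length + 1) [c]).insertIdx (pre.length + 2) (w.drop (nw.length + 1))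
                        else (pre ++ w :: rs).insertIdx (pre.length + 1) [c]).set pre.length nw
                  else (if w.drop (nw.length + 1) ≠ []
                        then ((pre ++ w :: rs).insertIdx (pre.length + 1) [c]).insertIdx (pre.length + 2) (w.drop (nw.length + 1))
                        else (pre ++ w :: rs).insertIdx (pre.length + 1) [c]).eraseIdx pre.length)
                (pre.length + 1) := by
            simp only [loopA, hget, if_neg hskip, hsome]
          rw [hstep, hsuffix]
          have hins1 : (pre ++ w :: rs).insertIdx (pre.length + 1) [c] = pre ++ w :: [c] :: rs := by
            rw [insertIdx_append₂ pre 1 (w :: rs) [c]]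
            simp [List.insertIdx]
          have hins2 : (pre ++ w :: [c] :: rs).insertIdx (pre.length + 2) s = pre ++ w :: [c] :: s :: rs := by
            rw [insertIdx_append₂ pre 2 (w :: [c] :: rs) s]
            simp [List.insertIdx]
          by_cases hnwe : nw = []
          · rw [if_neg (by simp [hnwe])]
            by_cases hs : s = []
            · -- w = [c]: the word is deleted and the inserted [c] takes its place
              rw [if_neg (by simp [hs]), hins1]
              have herase : (pre ++ w :: [c] :: rs).eraseIdx pre.length = pre ++ [c] :: rs := by
                rw [List.eraseIdx_append]
                simp
              rw [herase, show pre ++ [c] :: rs = (pre ++ [[c]]) ++ rs by simp,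
                  show pre.length + 1 = (pre ++ [[c]]).length by simp,
                  ih _ rs (by have := costW_pos w; omega)]
              conv_rhs => rw [List.flatMap_cons, hsplitw]
              simp [innerB, hnwe, hs, splitF_single_punct c hc]
            · rw [if_pos hs, hins1, hins2]
              have herase : (pre ++ w :: [c] :: s :: rs).eraseIdx pre.length = pre ++ [c] :: s :: rs := by
                rw [List.eraseIdx_append]
                simp
              have hmr : measureA (s :: rs) < f := by
                rw [measureA_cons]
                have hlen : nw.length = 0 := by rw [hnwe]; rfl
                omega
              rw [herase, show pre ++ [c] :: s :: rs = (pre ++ [[c]]) ++ s :: rs by simp,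
                  show pre.length + 1 = (pre ++ [[c]]).length by simp, ih _ (s :: rs) hmr]
              conv_rhs => rw [List.flatMap_cons, hsplitw]
              simp [hnwe, splitF_single_punct c hc, hssplit hs]
          · rw [if_pos hnwe]
            have hnwlen : 1 ≤ nw.length := by
              cases hx : nw with
              | nil => exact absurd hx hnwe
              | cons _ _ => simp [hx]
            by_cases hs : s = []
            · rw [if_neg (by simp [hs]), hins1]
              have hset : (pre ++ w :: [c] :: rs).set pre.length nw = pre ++ nw :: [c] :: rs := by
                rw [List.set_append]
                simp
              have hmr : measureA ([c] :: rs) < f := by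
                rw [measureA_cons]
                have hcs : costW s = 1 := by rw [hs]; rfl
                omega
              rw [hset, show pre ++ nw :: [c] :: rs = (pre ++ [nw]) ++ [c] :: rs by simp,
                  show pre.length + 1 = (pre ++ [nw]).length by simp, ih _ ([c] :: rs) hmr]
              conv_rhs => rw [List.flatMap_cons, hsplitw]
              simp [innerB, hnwe, hs, splitF_single_punct c hc]
            · rw [if_pos hs, hins1, hins2]
              have hset : (pre ++ w :: [c] :: s :: rs).set pre.length nw = pre ++ nw :: [c] :: s :: rs := by
                rw [List.set_append]
                simp
              have hmr : measureA ([c] :: s :: rs) < f := by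
                rw [measureA_cons, measureA_cons]
                omega
              rw [hset, show pre ++ nw :: [c] :: s :: rs = (pre ++ [nw]) ++ [c] :: s :: rs by simp,
                  show pre.length + 1 = (pre ++ [nw]).length by simp, ih _ ([c] :: s :: rs) hmr]
              conv_rhs => rw [List.flatMap_cons, hsplitw]
              simp [hnwe, splitF_single_punct c hc, hssplit hs]

lemma alt_eq_flatMap (word_list : List String) :
    split_punctuators_alt word_list
      = ((word_list.map String.toList).flatMap splitF).map (fun cs => String.ofList cs) := by
  unfold split_punctuators_alt
  have hcongr : word_list.foldl (fun out word =>
      if word.toList = [] then out ++ [word.toList]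
      else innerB out [] word.toList) []
      = word_list.foldl (fun out word => out ++ splitF word.toList) [] := by
    apply PySem.List.foldl_congr_mem
    intro acc x _
    by_cases hx : x.toList = []
    · simp [hx, splitF]
    · simp only [hx, if_neg hx, splitF, if_false]
      exact innerB_out _ acc []
  rw [hcongr, PySem.List.foldl_append_eq_flatMap]
  rw [List.flatMap_map]
  simp

-- ===== VERDICT (by name: the statement is the Claim_ definition above) =====
theorem split_punctuators_spec : Claim_equal_split_punctuators := by
  intro word_list _
  unfold Spec_split_punctuators split_punctuators
  rw [alt_eq_flatMap]
  have h := loopA_eq (measureA (word_list.map String.toList) + 1) []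
      (word_list.map String.toList) (by omega)
  simp only [List.nil_append, List.length_nil] at h
  rw [h]
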